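-- pv_equiv track=rewrite | github.com/taufderl/google-code-jam-2016 | qualification/D.py | transform
-- ===== SOURCE A (Python) =====
-- L_CHAR='0'
--
-- G_CHAR='1'
--
-- def transform(original, C):
--   art = original
--   K = len(art)
--   for c in range(1,C):
--     tmp = ''
--     for i in range(len(art)):
--       if art[i] == L_CHAR:
--         tmp += original
--       elif art[i] == G_CHAR:
--         tmp += K*G_CHAR
--     art = tmp
--   return art
-- ===== SOURCE B (Python) =====
-- L_CHAR='0'
--
-- G_CHAR='1'
--
-- def transform(original, C):
--   # Depth-indexed expansion of the substitution system: only the expansion of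
--   # L_CHAR needs to be carried through the depths (G_CHAR expands to the closed
--   # form G_CHAR * K**d, every other symbol vanishes at depth >= 1, so the string
--   # is filtered once to its L_CHAR/G_CHAR core).
--   K = len(original)
--   n = C - 1
--   if n <= 0:
--     return original
--   core = [c for c in original if c == L_CHAR or c == G_CHAR]
--   e0 = original  # expansion of L_CHAR to depth 1
--   for d in range(1, n):
--     e0 = ''.join(e0 if c == L_CHAR else G_CHAR * K**d for c in core)
--   return ''.join(e0 if c == L_CHAR else G_CHAR * K**n for c in core)
-- ===== Notes on version B (the rewrite author's own statement) =====
-- stated objective: alternative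
-- what changed: Replaces A's C-1 global left-to-right rewriting passes over the whole working string with a depth-indexed per-symbol expansion: the string is filtered once to its '0'/'1' core, only the expansion of '0' is carried through the depths, '1' uses the closed form '1'*K**d, and the result is joined over the core once at the end.
import Mathlib
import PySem

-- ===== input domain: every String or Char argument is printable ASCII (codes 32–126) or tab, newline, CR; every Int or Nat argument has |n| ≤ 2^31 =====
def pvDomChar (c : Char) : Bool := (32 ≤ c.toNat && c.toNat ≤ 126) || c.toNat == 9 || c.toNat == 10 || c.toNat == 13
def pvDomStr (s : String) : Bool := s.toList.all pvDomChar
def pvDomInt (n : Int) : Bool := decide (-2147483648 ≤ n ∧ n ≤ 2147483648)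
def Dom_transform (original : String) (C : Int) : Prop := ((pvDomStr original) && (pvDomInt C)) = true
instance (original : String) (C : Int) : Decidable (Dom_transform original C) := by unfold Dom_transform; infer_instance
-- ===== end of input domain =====

-- B replaces A's C-1 global rewriting passes with a depth-indexed per-symbol expansion that
-- carries only the expansion of '0' through the depths ('1' has the closed form '1'*K**d).

-- ===== PORT A =====
-- one rewriting pass of A's inner loop: for i in range(len(art)): tmp += …
def transformPassA (orig : List Char) (art : List Char) : List Char :=
  (PySem.List.pyRange 0 (PySem.List.len art) 1).foldl
    (fun tmp i =>
      -- art[i] (always in range here), tested against L_CHAR then G_CHAR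
      if PySem.List.pyGetD art i ' ' == '0' then tmp ++ orig
      else if PySem.List.pyGetD art i ' ' == '1' then tmp ++ List.replicate orig.length '1'  -- K*G_CHAR, K = len(original) ≥ 0
      else tmp)
    []

def transform (original : String) (C : Int) : String :=
  let art := original.toList
  -- K = len(art) computed before the loop; art = original there, so K = len(original)
  String.ofList ((PySem.List.pyRange 1 C 1).foldl (fun art _ => transformPassA original.toList art) art)

-- ===== PORT B =====
-- the join of Source B's generator over the core: '0' ↦ e0, '1' ↦ '1' * K**d
def stepAltB (core : List Char) (K : Nat) (e0 : List Char) (d : Nat) : List Char :=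
  core.flatMap (fun c => if c == '0' then e0 else List.replicate (K ^ d) '1')

def transform_alt (original : String) (C : Int) : String :=
  let K := original.toList.length          -- K = len(original) (a Python len, hence a Nat)
  let n := C - 1
  if n ≤ 0 then original
  else
    -- core = [c for c in original if c == L_CHAR or c == G_CHAR]
    let core := original.toList.filter (fun c => c == '0' || c == '1')
    -- for d in range(1, n): e0 = ''.join(…)   (e0 starts as original, the depth-1 expansion of '0')
    let e0 := (PySem.List.pyRange 1 n 1).foldl
      (fun e0 d => stepAltB core K e0 d.toNat) original.toList
    String.ofList (stepAltB core K e0 n.toNat)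

-- ===== PRECONDITION & SPEC =====
def Spec_transform (original : String) (C : Int) (out : String) : Prop := out = transform_alt original C
instance (original : String) (C : Int) (out : String) : Decidable (Spec_transform original C out) := by unfold Spec_transform; infer_instance

-- ===== CLAIM (what is proved, stated in full; the proofs are below) =====
def Claim_equal_transform : Prop := ∀ (original : String) (C : Int), Dom_transform original C → Spec_transform original C (transform original C)

-- ===== LEMMAS AND PROOFS =====

-- proof-side spec: the image of one symbol, and its expansion to a given depth
def imgSpec (orig : List Char) (ch : Char) : List Char :=
  if ch == '0' then orig
  else if ch == '1' then List.replicate orig.length '1'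
  else []

def expandSpec (orig : List Char) : Char → Nat → List Char
  | ch, 0 => [ch]
  | ch, n + 1 => (imgSpec orig ch).flatMap (fun y => expandSpec orig y n)

-- A's inner index loop is one global rewriting pass, a flatMap of the per-symbol image
theorem transformPassA_eq_flatMap (orig art : List Char) :
    transformPassA orig art = art.flatMap (imgSpec orig) := by
  unfold transformPassA
  rw [PySem.List.foldl_pyRange_zero_pyGetD
        (f := fun tmp ch =>
          if ch == '0' then tmp ++ orig
          else if ch == '1' then tmp ++ List.replicate orig.length '1'
          else tmp)]
  suffices h : ∀ (acc : List Char),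
      art.foldl (fun tmp ch =>
        if ch == '0' then tmp ++ orig
        else if ch == '1' then tmp ++ List.replicate orig.length '1'
        else tmp) acc = acc ++ art.flatMap (imgSpec orig) by
    simpa using h []
  induction art with
  | nil => simp
  | cons c cs ih =>
    intro acc
    simp only [List.foldl_cons, List.flatMap_cons, ih, imgSpec]
    split_ifs <;> simp

-- a foldl that ignores the list elements is function iteration
theorem foldl_const_eq_iterate {α β : Type} (g : α → α) (l : List β) (init : α) :
    l.foldl (fun a _ => g a) init = g^[l.length] init := by
  induction l generalizing init with
  | nil => simp
  | cons x xs ih => simp [List.foldl_cons, ih, Function.iterate_succ_apply]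

-- n rewriting passes = per-symbol expansion to depth n
theorem iterate_pass_eq_expand (orig : List Char) (n : Nat) (s : List Char) :
    (fun art => art.flatMap (imgSpec orig))^[n] s
      = s.flatMap (fun c => expandSpec orig c n) := by
  induction n generalizing s with
  | zero => simp [expandSpec]
  | succ n ih =>
    rw [Function.iterate_succ_apply, ih, List.flatMap_assoc]
    simp [expandSpec]

-- the expansion of '1' to depth m is K^m ones
theorem expand_one_eq_replicate (orig : List Char) (m : Nat) :
    expandSpec orig '1' m = List.replicate (orig.length ^ m) '1' := by
  induction m with
  | zero => simp [expandSpec]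
  | succ m ih =>
    have hj : ∀ j, (List.replicate j '1').flatMap (fun y => expandSpec orig y m)
        = List.replicate (j * orig.length ^ m) '1' := by
      intro j
      induction j with
      | zero => simp
      | succ j ihj =>
        rw [List.replicate_succ, List.flatMap_cons, ihj, ih, ← List.replicate_add]
        congr 1
        ring
    simp only [expandSpec, imgSpec]
    rw [if_neg (by decide), if_pos (by decide), hj orig.length]
    congr 1
    rw [pow_succ]
    ring
  
-- B's step at depth m+1 over the '0'/'1' core, fed the depth-(m+1) expansion of '0',
-- yields each symbol's depth-(m+1) expansion across the whole list (others vanish)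
theorem stepAltB_eq (orig : List Char) (e : List Char) (m : Nat)
    (he : e = expandSpec orig '0' (m + 1)) (l : List Char) :
    stepAltB (l.filter (fun c => c == '0' || c == '1')) orig.length e (m + 1)
      = l.flatMap (fun c => expandSpec orig c (m + 1)) := by
  have hcons : ∀ (x : Char) (rest e0 : List Char) (d : Nat),
      stepAltB (x :: rest) orig.length e0 d
        = (if x == '0' then e0 else List.replicate (orig.length ^ d) '1')
            ++ stepAltB rest orig.length e0 d := by
    intro x rest e0 d
    simp [stepAltB]
  induction l with
  | nil => rfl
  | cons c cs ih =>
    by_cases h0 : c = '0'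
    · simp only [h0, List.filter_cons]
      rw [if_pos (by decide), hcons, if_pos (by decide), ih, List.flatMap_cons]
      simp [he]
    · by_cases h1 : c = '1'
      · simp only [h1, List.filter_cons]
        rw [if_pos (by decide), hcons, if_neg (by decide), ih, List.flatMap_cons]
        simp [expand_one_eq_replicate]
      · simp only [List.filter_cons]
        rw [if_neg (by simp [h0, h1]), ih, List.flatMap_cons]
        have : imgSpec orig c = [] := by simp [imgSpec, h0, h1]
        simp [expandSpec, this]

-- the flatMap expansion of the whole original IS the next expansion of '0'
theorem flatMap_expand_eq_expand_zero (orig : List Char) (m : Nat) :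
    orig.flatMap (fun c => expandSpec orig c m) = expandSpec orig '0' (m + 1) := by
  simp [expandSpec, imgSpec]

-- B's depth loop (d = 1 .. m) carries e0 from depth 1 to depth m+1
theorem foldl_stepAltB (orig : List Char) (m : Nat) :
    (PySem.List.pyRange 1 (1 + (m : Int)) 1).foldl
        (fun e0 d => stepAltB (orig.filter (fun c => c == '0' || c == '1'))
          orig.length e0 d.toNat) orig
      = expandSpec orig '0' (m + 1) := by
  induction m with
  | zero =>
    rw [PySem.List.pyRange_one_eq_nil (by omega)]
    simp [expandSpec, imgSpec]
  | succ m ih =>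
    have hsplit : (1 : Int) + ((m : Int) + 1) = (1 + (m : Int)) + 1 := by ring
    rw [show ((m + 1 : Nat) : Int) = (m : Int) + 1 by push_cast; ring, hsplit,
      PySem.List.pyRange_one_succ_right (by omega), List.foldl_append]
    simp only [List.foldl_cons, List.foldl_nil, ih]
    have ht : ((1 : Int) + (m : Int)).toNat = m + 1 := by omega
    rw [ht, stepAltB_eq orig _ m rfl orig, flatMap_expand_eq_expand_zero]

-- ===== VERDICT (by name: the statement is the Claim_ definition above) =====
theorem transform_spec : Claim_equal_transform := by
  intro original C _
  unfold Spec_transform transform transform_alt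
  by_cases hC : C - 1 ≤ 0
  · rw [if_pos hC, PySem.List.pyRange_one_eq_nil (by omega)]
    simp
  · rw [if_neg hC]
    have hlen : (PySem.List.pyRange 1 C 1).length = (C - 1).toNat :=
      PySem.List.length_pyRange_one 1 C
    obtain ⟨m, hm⟩ : ∃ m : Nat, (C - 1).toNat = m + 1 :=
      ⟨(C - 1).toNat - 1, by omega⟩
    have hA : (PySem.List.pyRange 1 C 1).foldl
        (fun art _ => transformPassA original.toList art) original.toList
        = original.toList.flatMap (fun c => expandSpec original.toList c (m + 1)) := by
      calc (PySem.List.pyRange 1 C 1).foldl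
            (fun art _ => transformPassA original.toList art) original.toList
          = (PySem.List.pyRange 1 C 1).foldl
              (fun art _ => art.flatMap (imgSpec original.toList)) original.toList := by
            simp only [transformPassA_eq_flatMap]
        _ = (fun art => art.flatMap (imgSpec original.toList))^[(PySem.List.pyRange 1 C 1).length]
              original.toList := foldl_const_eq_iterate _ _ _
        _ = original.toList.flatMap (fun c => expandSpec original.toList c (m + 1)) := by
            rw [hlen, hm, iterate_pass_eq_expand]
    have hB : (PySem.List.pyRange 1 (C - 1) 1).foldl
        (fun e0 d => stepAltB (original.toList.filter (fun c => c == '0' || c == '1'))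
          original.toList.length e0 d.toNat)
        original.toList = expandSpec original.toList '0' (m + 1) := by
      rw [show C - 1 = 1 + (m : Int) by omega]
      exact foldl_stepAltB original.toList m
    simp only [hA, hB, hm, stepAltB_eq _ _ m rfl]
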